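-- pv_equiv track=rewrite | github.com/rebuilder945/FL_research | ast_research/python_code_5.23/lastterm_page10/success_code/林昊达-2796-2023-05-30_10_12_47.py | find1stmax
-- ===== SOURCE A (Python) =====
-- def find1stmax(ls):
--     max=0
--     for i in ls:
--         if len(i)>max:
--             max=len(i)
--     for i in ls:
--         if len(i)==max:
--             return i
-- ===== SOURCE B (Python) =====
-- def find1stmax(ls):
--     if not ls:
--         return None
--     best = ls[0]
--     best_len = len(best)
--     for i in ls[1:]:
--         if len(i) > best_len:
--             best = i
--             best_len = len(i)
--     return best
-- ===== Notes on version B (the rewrite author's own statement) =====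
-- stated objective: alternative
-- what changed: B fuses A's two sequential scans (compute the max length, then rescan for the first element of that length) into one pass that keeps the current best element, seeded from the first element.
-- outside the precondition, e.g. on find1stmax([]): A returns None, B returns None
import Mathlib
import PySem

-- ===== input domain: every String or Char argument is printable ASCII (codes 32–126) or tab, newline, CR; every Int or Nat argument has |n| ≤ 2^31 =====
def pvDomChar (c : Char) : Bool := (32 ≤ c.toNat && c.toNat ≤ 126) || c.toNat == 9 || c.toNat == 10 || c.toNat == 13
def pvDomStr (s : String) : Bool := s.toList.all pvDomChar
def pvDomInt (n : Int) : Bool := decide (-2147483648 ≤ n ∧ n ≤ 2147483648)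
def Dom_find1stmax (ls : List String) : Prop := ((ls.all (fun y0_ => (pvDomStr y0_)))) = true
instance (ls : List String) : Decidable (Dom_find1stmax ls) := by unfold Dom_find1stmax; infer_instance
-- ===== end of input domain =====

-- B fuses A's two scans (max length, then first element of that length) into one pass keeping the current best; return-value equivalence on nonempty lists.

-- ===== PORT A =====
-- first loop: max = 0; for i in ls: if len(i) > max: max = len(i)
def find1stmaxMax (ls : List String) : Int :=
  ls.foldl (fun m i => if PySem.Str.len i > m then PySem.Str.len i else m) 0

-- second loop: for i in ls: if len(i) == max: return i   (falls off only on [], excluded by Pre_; "" stands for that absent return)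
def find1stmax (ls : List String) : String :=
  (ls.find? (fun i => PySem.Str.len i == find1stmaxMax ls)).getD ""

-- ===== PORT B =====
def find1stmax_alt (ls : List String) : String :=
  match ls with
  | [] => ""  -- Source B returns None here; excluded by Pre_
  | b :: rest =>
      (rest.foldl (fun (st : String × Int) i =>
        if PySem.Str.len i > st.2 then (i, PySem.Str.len i) else st) (b, PySem.Str.len b)).1

-- ===== PRECONDITION & SPEC =====
-- Pre_ excludes only the empty list, where Python A falls through both loops and returns None, not a str.
def Pre_find1stmax (ls : List String) : Prop := ls ≠ []
instance (ls : List String) : Decidable (Pre_find1stmax ls) := by unfold Pre_find1stmax; infer_instance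
def pvWitness_find1stmax : List String := ["a", "bc", "de"]

def Spec_find1stmax (ls : List String) (out : String) : Prop := out = find1stmax_alt ls
instance (ls : List String) (out : String) : Decidable (Spec_find1stmax ls out) := by unfold Spec_find1stmax; infer_instance

-- ===== CLAIM (what is proved, stated in full; the proofs are below) =====
def Claim_equal_find1stmax : Prop := ∀ (ls : List String), Dom_find1stmax ls → Pre_find1stmax ls → Spec_find1stmax ls (find1stmax ls)

-- ===== LEMMAS AND PROOFS =====

-- A's max-accumulating fold never decreases its accumulator
theorem pv_le_foldA {a : Type} (f : a -> Int) (xs : List a) : forall (m : Int),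
    m <= xs.foldl (fun m i => if f i > m then f i else m) m := by
  induction xs with
  | nil => intro m; simp
  | cons x xs ih =>
      intro m
      simp only [List.foldl_cons]
      by_cases h : f x > m
      · rw [if_pos h]; exact le_trans (le_of_lt h) (ih _)
      · rw [if_neg h]; exact ih m

-- seeding A's fold with 0 on a cons equals seeding with the head's length
theorem pv_foldA_cons (b : String) (xs : List String) :
    (b :: xs).foldl (fun m i => if PySem.Str.len i > m then PySem.Str.len i else m) 0
      = xs.foldl (fun m i => if PySem.Str.len i > m then PySem.Str.len i else m) (PySem.Str.len b) := by
  simp only [List.foldl_cons]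
  congr 1
  have h : (0 : Int) <= PySem.Str.len b := by simp [PySem.Str.len_eq]
  by_cases hb : PySem.Str.len b > 0
  · rw [if_pos hb]
  · rw [if_neg hb]; omega

-- core invariant: B's running best is the first element of b::xs whose length equals A's max
theorem pv_core {a : Type} (f : a -> Int) (xs : List a) : forall (b : a),
    (b :: xs).find? (fun i => f i ==
        xs.foldl (fun m i => if f i > m then f i else m) (f b))
      = some (xs.foldl (fun (st : a × Int) i =>
          if f i > st.2 then (i, f i) else st) (b, f b)).1 := by
  induction xs with
  | nil => intro b; simp [List.find?]
  | cons x xs ih =>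
      intro b
      simp only [List.foldl_cons]
      by_cases h : f x > f b
      · rw [if_pos h, if_pos h]
        have hm := pv_le_foldA f xs (f x)
        have hb : (f b == xs.foldl (fun m i => if f i > m then f i else m) (f x)) = false := by
          rw [beq_eq_false_iff_ne]; intro he; omega
        have hx := ih x
        simp only [List.find?] at hx ⊢
        rw [hb]
        exact hx
      · rw [if_neg h, if_neg h]
        by_cases hb : (f b == xs.foldl (fun m i => if f i > m then f i else m) (f b)) = true
        · have hx := ih b
          simp only [List.find?, hb] at hx ⊢
          exact hx
        · have hbf : (f b == xs.foldl (fun m i => if f i > m then f i else m) (f b)) = false :=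
            eq_false_of_ne_true hb
          have hmono := pv_le_foldA f xs (f b)
          have hne : f b ≠ xs.foldl (fun m i => if f i > m then f i else m) (f b) := by
            simpa [beq_eq_false_iff_ne] using hbf
          have hxle : ¬ f x > f b := h
          have hx : (f x == xs.foldl (fun m i => if f i > m then f i else m) (f b)) = false := by
            rw [beq_eq_false_iff_ne]; intro he; omega
          have hind := ih b
          simp only [List.find?, hbf] at hind
          simp only [List.find?, hbf, hx]
          exact hind

-- ===== VERDICT (by name: the statement is the Claim_ definition above) =====
theorem find1stmax_spec : Claim_equal_find1stmax := by
  intro ls _ hpre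
  match ls with
  | [] => exact absurd rfl hpre
  | b :: xs =>
      unfold Spec_find1stmax find1stmax find1stmaxMax find1stmax_alt
      rw [pv_foldA_cons, pv_core PySem.Str.len xs b]
      rfl
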